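-- pv_equiv track=rewrite | github.com/AdminL3/TTSClone | gradio_app.py | find_min_bucket_gte
-- ===== SOURCE A (Python) =====
-- def find_min_bucket_gte(values_str: str, actual_length: int) -> int | None:
--     """Parse comma-separated values and find minimum value >= actual_length.
--
--     If a single value is provided (no comma), returns that value directly.
--     If comma-separated, finds the smallest bucket that can fit the content.
--     Returns None if empty string.
--     """
--     if not values_str or not values_str.strip():
--         return None
--
--     values_str = values_str.strip()
--
--     # Single value case - return as-is
--     if "," not in values_str:
--         return int(values_str)
--
--     # Multiple values - find minimum >= actual_length
--     values = [int(v.strip()) for v in values_str.split(",") if v.strip()]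
--     if not values:
--         return None
--
--     # Find minimum value >= actual_length
--     candidates = [v for v in values if v >= actual_length]
--     if candidates:
--         return min(candidates)
--
--     # If no value is >=, return the maximum (best effort)
--     return max(values)
-- ===== SOURCE B (Python) =====
-- def find_min_bucket_gte(values_str: str, actual_length: int) -> int | None:
--     """Sort-then-scan variant: sort the parsed values and return the first one
--     that is >= actual_length; if the scan falls off the end, the last (largest)
--     sorted element is the best-effort answer."""
--     if not values_str or not values_str.strip():
--         return None
--
--     values_str = values_str.strip()
--
--     if "," not in values_str:
--         return int(values_str)
--
--     values = sorted(int(v.strip()) for v in values_str.split(",") if v.strip())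
--     if not values:
--         return None
--
--     for v in values:
--         if v >= actual_length:
--             return v
--     return values[-1]
-- ===== Notes on version B (the rewrite author's own statement) =====
-- stated objective: alternative
-- what changed: A materialises the parsed list, builds a filtered candidate list and calls min, with a separate max fallback; B sorts the parsed values once and does a single early-exit scan of the sorted list: the first element >= actual_length is the minimum qualifying bucket, and if none qualifies the last sorted element is the maximum.
import Mathlib
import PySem

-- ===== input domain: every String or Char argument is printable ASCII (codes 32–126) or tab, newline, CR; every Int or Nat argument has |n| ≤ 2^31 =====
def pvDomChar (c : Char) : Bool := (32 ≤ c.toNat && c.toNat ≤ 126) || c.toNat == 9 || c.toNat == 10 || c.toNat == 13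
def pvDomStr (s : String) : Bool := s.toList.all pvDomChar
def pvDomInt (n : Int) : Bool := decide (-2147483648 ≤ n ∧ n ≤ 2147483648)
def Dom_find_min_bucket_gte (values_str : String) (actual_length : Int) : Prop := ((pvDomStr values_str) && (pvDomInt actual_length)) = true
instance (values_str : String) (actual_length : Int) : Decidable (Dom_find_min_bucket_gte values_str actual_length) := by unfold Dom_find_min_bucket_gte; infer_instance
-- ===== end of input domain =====

-- B replaces A's filter-list+min with separate max fallback by sort-then-scan: first sorted element >= actual_length, else the last; same values, different algorithm (objective: alternative).
-- s.split(",") — the separator is the nonempty literal ",", so split? is always `some`; the default is never reached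
def pvSplit (s : String) : List String := (PySem.Str.split? s ",").getD []

-- ===== PORT A =====
def find_min_bucket_gte (values_str : String) (actual_length : Int) : Option Int :=
  if values_str = "" ∨ PySem.Str.strip values_str = "" then none
  else
    let s := PySem.Str.strip values_str
    if ¬ PySem.Str.isIn "," s then
      PySem.Int.ofStr? s
    else
      -- the list comprehension [int(v.strip()) for v in s.split(",") if v.strip()]; a failing int() is a ValueError (outside Pre_)
      match ((pvSplit s).filter (fun v => PySem.Str.strip v ≠ "")).mapM
              (fun v => PySem.Int.ofStr? (PySem.Str.strip v)) with
      | none => none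
      | some values =>
        if values = [] then none
        else
          let candidates := values.filter (fun v => actual_length ≤ v)
          if candidates ≠ [] then PySem.List.min? candidates (fun x => x)
          else PySem.List.max? values (fun x => x)

-- ===== PORT B =====
-- the early-exit scan 'for v in values: if v >= actual_length: return v'
def pvFirstGE (actual_length : Int) : List Int → Option Int
  | [] => none
  | v :: t => if actual_length ≤ v then some v else pvFirstGE actual_length t

def find_min_bucket_gte_alt (values_str : String) (actual_length : Int) : Option Int :=
  if values_str = "" ∨ PySem.Str.strip values_str = "" then none
  else
    let s := PySem.Str.strip values_str
    if ¬ PySem.Str.isIn "," s then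
      PySem.Int.ofStr? s
    else
      -- sorted(int(v.strip()) for v in s.split(",") if v.strip()); a failing int() is a ValueError (outside Pre_)
      match ((pvSplit s).filter (fun v => PySem.Str.strip v ≠ "")).mapM
              (fun v => PySem.Int.ofStr? (PySem.Str.strip v)) with
      | none => none
      | some vs =>
        let values := PySem.List.sorted vs (fun x => x) false
        if values = [] then none
        else
          match pvFirstGE actual_length values with
          | some v => some v
          | none => PySem.List.pyGet? values (-1)   -- values[-1]

-- ===== PRECONDITION & SPEC =====
-- Pre_ excludes exactly the inputs where int() raises ValueError in A (a non-integer token); B raises there too.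
def Pre_find_min_bucket_gte (values_str : String) (actual_length : Int) : Prop :=
  values_str = "" ∨ PySem.Str.strip values_str = "" ∨
  (if PySem.Str.isIn "," (PySem.Str.strip values_str) then
     ∀ tok ∈ pvSplit (PySem.Str.strip values_str),
       PySem.Str.strip tok = "" ∨ PySem.Int.ofStr? (PySem.Str.strip tok) ≠ none
   else PySem.Int.ofStr? (PySem.Str.strip values_str) ≠ none)

instance (values_str : String) (actual_length : Int) : Decidable (Pre_find_min_bucket_gte values_str actual_length) := by
  unfold Pre_find_min_bucket_gte; infer_instance

def pvWitness_find_min_bucket_gte : String × Int := (" 3 , 1 ,, 8 ", 5)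

def Spec_find_min_bucket_gte (values_str : String) (actual_length : Int) (out : Option Int) : Prop := out = find_min_bucket_gte_alt values_str actual_length
instance (values_str : String) (actual_length : Int) (out : Option Int) : Decidable (Spec_find_min_bucket_gte values_str actual_length out) := by unfold Spec_find_min_bucket_gte; infer_instance

-- ===== CLAIM =====
def Claim_equal_find_min_bucket_gte : Prop := ∀ (values_str : String) (actual_length : Int), Dom_find_min_bucket_gte values_str actual_length → Pre_find_min_bucket_gte values_str actual_length → Spec_find_min_bucket_gte values_str actual_length (find_min_bucket_gte values_str actual_length)

-- ===== LEMMAS AND PROOFS =====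

theorem pvFirstGE_eq_none_iff (al : Int) (S : List Int) :
    pvFirstGE al S = none ↔ ∀ y ∈ S, y < al := by
  induction S with
  | nil => simp [pvFirstGE]
  | cons v t ih =>
    by_cases h : al ≤ v
    · simp only [pvFirstGE, if_pos h]
      constructor
      · intro hc; cases hc
      · intro hall; exact absurd (hall v List.mem_cons_self) (by omega)
    · simp only [pvFirstGE, if_neg h, ih, List.mem_cons]
      constructor
      · intro hall y hy
        rcases hy with rfl | hy
        · omega
        · exact hall y hy
      · intro hall y hy; exact hall y (Or.inr hy)

theorem pvFirstGE_some_spec (al : Int) (S : List Int) (v : Int)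
    (hpw : S.Pairwise (· ≤ ·)) (h : pvFirstGE al S = some v) :
    v ∈ S ∧ al ≤ v ∧ ∀ y ∈ S, al ≤ y → v ≤ y := by
  induction S with
  | nil => simp [pvFirstGE] at h
  | cons w t ih =>
    rcases List.pairwise_cons.mp hpw with ⟨hw, hpt⟩
    simp only [pvFirstGE] at h
    by_cases hal : al ≤ w
    · rw [if_pos hal] at h
      cases h
      refine ⟨List.mem_cons_self, hal, fun y hy _ => ?_⟩
      rcases List.mem_cons.mp hy with h | h
      · omega
      · exact hw y h
    · rw [if_neg hal] at h
      obtain ⟨hm, hge, hmin⟩ := ih hpt h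
      refine ⟨List.mem_cons_of_mem _ hm, hge, fun y hy hgy => ?_⟩
      rcases List.mem_cons.mp hy with h' | h'
      · omega
      · exact hmin y h' hgy

-- values[-1] on a nonempty list is its last element
theorem pvGetNeg1_getLast? (S : List Int) :
    PySem.List.pyGet? S (-1) = S.getLast? := by
  induction S with
  | nil => rfl
  | cons v t ih =>
    cases t with
    | nil => rfl
    | cons w u =>
      rw [List.getLast?_cons_cons, ← ih]
      simp [PySem.List.pyGet?, PySem.List.pyIdx?]
      omega

theorem getLast_isMax (S : List Int) (hpw : S.Pairwise (· ≤ ·)) (m : Int)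
    (h : S.getLast? = some m) : ∀ y ∈ S, y ≤ m := by
  induction S with
  | nil => simp at h
  | cons v t ih =>
    rcases List.pairwise_cons.mp hpw with ⟨hv, hpt⟩
    cases t with
    | nil => simp_all
    | cons w u =>
      rw [List.getLast?_cons_cons] at h
      intro y hy
      rcases List.mem_cons.mp hy with h' | h'
      · subst h'
        have hm := List.mem_of_getLast? h
        exact hv m hm
      · exact ih hpt h y h'

-- ===== VERDICT =====
theorem find_min_bucket_gte_spec : Claim_equal_find_min_bucket_gte := by
  intro values_str actual_length _hdom hpre
  unfold Spec_find_min_bucket_gte find_min_bucket_gte find_min_bucket_gte_alt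
  by_cases hempty : values_str = "" ∨ PySem.Str.strip values_str = ""
  · rw [if_pos hempty, if_pos hempty]
  · rw [if_neg hempty, if_neg hempty]
    by_cases hcomma : PySem.Str.isIn "," (PySem.Str.strip values_str)
    · rw [if_neg (by simpa using hcomma), if_neg (by simpa using hcomma)]
      cases hps : ((pvSplit (PySem.Str.strip values_str)).filter (fun v => PySem.Str.strip v ≠ "")).mapM
          (fun v => PySem.Int.ofStr? (PySem.Str.strip v)) with
      | none => rfl
      | some ps =>
        by_cases hnil : ps = []
        · subst hnil; rfl
        · have hSnil : PySem.List.sorted ps (fun x => x) false ≠ [] :=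
            fun h => hnil ((PySem.List.sorted_eq_nil_iff _ _ _).mp h)
          simp only [if_neg hnil, if_neg hSnil]
          have hperm : (PySem.List.sorted ps (fun x => x) false).Perm ps :=
            PySem.List.sorted_perm ps (fun x => x) false
          have hpw : (PySem.List.sorted ps (fun x => x) false).Pairwise (· ≤ ·) := by
            simpa using PySem.List.sorted_pairwise ps (fun x => x)
          by_cases hcand : ps.filter (fun v => actual_length ≤ v) = []
          · -- no candidate: A takes max(ps), B falls off the scan and takes the last sorted element
            have hallG : ∀ y ∈ ps, y < actual_length := by
              intro y hy
              by_contra h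
              have : y ∈ ps.filter (fun v => actual_length ≤ v) := by
                simp [List.mem_filter, hy]; omega
              simp [hcand] at this
            have hF : pvFirstGE actual_length (PySem.List.sorted ps (fun x => x) false) = none := by
              rw [pvFirstGE_eq_none_iff]
              intro y hy; exact hallG y (hperm.mem_iff.mp hy)
            simp only [hcand, ne_eq, not_true_eq_false, if_neg, not_false_eq_true, hF]
            cases hmax : PySem.List.max? ps (fun x => x) with
            | none => exact absurd ((PySem.List.max?_eq_none_iff _ _).mp hmax) hnil
            | some m =>
              rw [pvGetNeg1_getLast?]
              cases hlast : (PySem.List.sorted ps (fun x => x) false).getLast? with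
              | none => exact absurd (List.getLast?_eq_none_iff.mp hlast) hSnil
              | some l =>
                have hlm : l ∈ ps := hperm.mem_iff.mp (List.mem_of_getLast? hlast)
                have h1 : l ≤ m := PySem.List.max?_isMax hmax l hlm
                have h2 : m ≤ l := getLast_isMax _ hpw l hlast m
                  (hperm.mem_iff.mpr (PySem.List.max?_mem hmax))
                have : l = m := by omega
                rw [this]
          · -- a candidate exists: A takes min of the filter, B's scan stops at the first sorted element >= actual_length
            simp only [ne_eq, hcand, not_false_eq_true, if_pos]
            cases hmin : PySem.List.min? (ps.filter (fun v => actual_length ≤ v)) (fun x => x) with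
            | none => exact absurd ((PySem.List.min?_eq_none_iff _ _).mp hmin) hcand
            | some m =>
              have hmmem := PySem.List.min?_mem hmin
              have hmf := List.mem_filter.mp hmmem
              have hmal : actual_length ≤ m := by simpa using hmf.2
              cases hF : pvFirstGE actual_length (PySem.List.sorted ps (fun x => x) false) with
              | none =>
                rw [pvFirstGE_eq_none_iff] at hF
                have := hF m (hperm.mem_iff.mpr hmf.1)
                omega
              | some v =>
                obtain ⟨hvS, hval, hvmin⟩ := pvFirstGE_some_spec actual_length _ v hpw hF
                have hvps : v ∈ ps := hperm.mem_iff.mp hvS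
                have h1 : m ≤ v := by
                  have : v ∈ ps.filter (fun w => actual_length ≤ w) := by
                    simp [List.mem_filter, hvps]; omega
                  simpa using PySem.List.min?_isMin hmin v this
                have h2 : v ≤ m := hvmin m (hperm.mem_iff.mpr hmf.1) hmal
                have : v = m := by omega
                rw [this]
    · rw [if_pos hcomma, if_pos hcomma]
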